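-- pv_equiv track=rewrite | github.com/yuweiiihuang/mahjong16 | core/hand.py | _counts34
-- ===== SOURCE A (Python) =====
-- from typing import Any, Dict, List, Optional, Tuple
--
-- def _counts34(tiles: List[int]) -> Tuple[int, ...]:
--     """Return a canonical count tuple for tiles in the range [0, 33]."""
--
--     counts = [0] * 34
--     for tile in tiles:
--         if 0 <= tile < 34:
--             counts[tile] += 1
--         else:
--             return tuple([0] * 34)
--     return tuple(counts)
-- ===== SOURCE B (Python) =====
-- def _counts34(tiles):
--     """Return a canonical count tuple for tiles in the range [0, 33]."""
--     s = sorted(tiles)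
--     if s and (s[0] < 0 or s[-1] >= 34):
--         return tuple([0] * 34)
--     out = []
--     j = 0
--     for v in range(34):
--         k = j
--         while k < len(s) and s[k] == v:
--             k += 1
--         out.append(k - j)
--         j = k
--     return tuple(out)
-- ===== Notes on version B (the rewrite author's own statement) =====
-- stated objective: alternative
-- what changed: Sorts the tiles first, validates range by inspecting only the minimum and maximum (the ends of the sorted list), then reads the 34 counts off the sorted list in a single run-length two-pointer merge scan instead of A's single pass that increments a preallocated 34-slot count array with an early discard.
import Mathlib
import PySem

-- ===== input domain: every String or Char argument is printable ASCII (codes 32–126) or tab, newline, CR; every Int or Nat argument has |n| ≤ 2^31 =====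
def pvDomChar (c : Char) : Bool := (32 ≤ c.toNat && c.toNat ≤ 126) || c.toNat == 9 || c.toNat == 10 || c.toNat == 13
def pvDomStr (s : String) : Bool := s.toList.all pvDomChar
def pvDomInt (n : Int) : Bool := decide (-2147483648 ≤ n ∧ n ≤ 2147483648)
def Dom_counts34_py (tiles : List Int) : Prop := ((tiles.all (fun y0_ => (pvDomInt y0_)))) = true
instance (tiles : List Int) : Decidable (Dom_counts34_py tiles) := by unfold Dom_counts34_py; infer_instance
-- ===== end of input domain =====

-- B sorts the tiles, validates by inspecting only the two ends of the sorted list, and reads the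
-- 34 counts off the sorted list with a two-pointer run-length scan (objective 'alternative');
-- return values proved identical on all inputs.

-- ===== PORT A =====
-- the for-loop over tiles, carrying the mutable counts list; the else-branch's early return
def counts34_loop (tiles : List Int) (counts : List Int) : List Int :=
  match tiles with
  | [] => counts
  | t :: rest =>
      if 0 ≤ t ∧ t < 34 then
        counts34_loop rest (counts.set t.toNat (counts.getD t.toNat 0 + 1))
      else
        List.replicate 34 0

def counts34_py (tiles : List Int) : List Int :=
  counts34_loop tiles (List.replicate 34 0)

-- ===== PORT B =====
-- the inner `while k < len(s) and s[k] == v: k += 1`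
def counts34_runEnd (s : List Int) (v : Int) (k : Nat) : Nat :=
  if h : k < s.length then
    if s[k] = v then counts34_runEnd s v (k + 1) else k
  else k
termination_by s.length - k

-- the outer `for v in range(34)` loop carrying the pointer j and the growing out list
def counts34_outer (s : List Int) (vs : List Int) (j : Nat) (out : List Int) : List Int :=
  match vs with
  | [] => out
  | v :: rest =>
      let k := counts34_runEnd s v j
      counts34_outer s rest k (out ++ [((k - j : Nat) : Int)])

def counts34_py_alt (tiles : List Int) : List Int :=
  let s := PySem.List.sorted tiles (fun x => x) false
  if s ≠ [] ∧ (s.headD 0 < 0 ∨ 34 ≤ s.getLastD 0) then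
    List.replicate 34 0
  else
    counts34_outer s (PySem.List.pyRange 0 34 1) 0 []

-- ===== PRECONDITION & SPEC =====
def Spec_counts34_py (tiles : List Int) (out : List Int) : Prop := out = counts34_py_alt tiles
instance (tiles : List Int) (out : List Int) : Decidable (Spec_counts34_py tiles out) := by unfold Spec_counts34_py; infer_instance

-- ===== CLAIM (what is proved, stated in full; the proofs are below) =====
def Claim_equal_counts34_py : Prop := ∀ (tiles : List Int), Dom_counts34_py tiles → Spec_counts34_py tiles (counts34_py tiles)

-- ===== LEMMAS AND PROOFS =====

-- A-side: the early-discard branch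
theorem counts34_loop_invalid (tiles : List Int) (counts : List Int)
    (h : ∃ t ∈ tiles, ¬ (0 ≤ t ∧ t < 34)) :
    counts34_loop tiles counts = List.replicate 34 0 := by
  induction tiles generalizing counts with
  | nil => simp at h
  | cons t rest ih =>
      simp only [counts34_loop]
      split_ifs with ht
      · apply ih
        rcases h with ⟨u, hu, hbad⟩
        rcases List.mem_cons.mp hu with rfl | hu
        · exact absurd ht hbad
        · exact ⟨u, hu, hbad⟩
      · rfl

-- A-side: the counting pass characterised as 34 independent counts
theorem counts34_loop_valid (tiles : List Int) (counts : List Int)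
    (h : ∀ t ∈ tiles, 0 ≤ t ∧ t < 34) (hlen : counts.length = 34) :
    counts34_loop tiles counts =
      (List.range 34).map (fun i => counts.getD i 0 + (tiles.count (i : Int) : Int)) := by
  induction tiles generalizing counts with
  | nil =>
      simp only [counts34_loop, List.count_nil]
      apply List.ext_getElem
      · simp [hlen]
      · intro i hi _
        simp_all [List.getD_eq_getElem?_getD, List.getElem?_eq_getElem hi]
  | cons t rest ih =>
      have ht := h t (List.mem_cons_self ..)
      simp only [counts34_loop, if_pos ht]
      rw [ih _ (fun u hu => h u (List.mem_cons_of_mem _ hu)) (by simp [hlen])]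
      apply List.map_congr_left
      intro i hi
      have hi34 : i < 34 := List.mem_range.mp hi
      have htn : t.toNat < counts.length := by omega
      by_cases hit : (i : Int) = t
      · have : i = t.toNat := by omega
        subst this
        simp [List.getD_eq_getElem?_getD, List.getElem?_set_self htn, hit]
        omega
      · have hne : i ≠ t.toNat := by omega
        simp only [List.getD_eq_getElem?_getD, List.getElem?_set_ne (by omega : t.toNat ≠ i),
          List.count_cons]
        have : ¬ (t = (i : Int)) := fun hh => hit hh.symm
        simp [this]

-- sorted-list facts -------------------------------------------------------

-- int strict bound split used for countP bookkeeping
theorem countP_lt_succ (s : List Int) (v : Int) :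
    s.countP (fun x => decide (x < v + 1)) =
      s.countP (fun x => decide (x < v)) + s.count v := by
  induction s with
  | nil => simp
  | cons a t ih =>
      simp only [List.countP_cons, List.count_cons, ih]
      by_cases hav : a = v
      · subst hav; simp; omega
      · by_cases hlt : a < v
        · have h1 : a < v + 1 := by omega
          simp [hlt, h1, hav]; omega
        · have h1 : ¬ a < v + 1 := by omega
          simp [hlt, h1, hav]

-- in a sorted list, the first countP(<v) elements are < v and the rest are ≥ v
theorem sorted_split (s : List Int) (hs : s.Pairwise (fun a b => a ≤ b)) (v : Int) :
    (∀ x ∈ s.take (s.countP (fun x => decide (x < v))), x < v) ∧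
    (∀ x ∈ s.drop (s.countP (fun x => decide (x < v))), v ≤ x) := by
  induction s with
  | nil => simp
  | cons a t ih =>
      have hat : ∀ x ∈ t, a ≤ x := (List.pairwise_cons.mp hs).1
      have ihc := ih (List.pairwise_cons.mp hs).2
      by_cases ha : a < v
      · have h1 : (a :: t).countP (fun x => decide (x < v))
            = t.countP (fun x => decide (x < v)) + 1 := by simp [ha]
        rw [h1, List.take_succ_cons, List.drop_succ_cons]
        refine ⟨?_, ihc.2⟩
        intro x hx
        rcases List.mem_cons.mp hx with rfl | hx
        · exact ha
        · exact ihc.1 x hx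
      · have hc0 : t.countP (fun x => decide (x < v)) = 0 := by
          apply List.countP_eq_zero.mpr
          intro x hx
          have := hat x hx
          simp only [decide_eq_true_eq]
          omega
        have h1 : (a :: t).countP (fun x => decide (x < v)) = 0 := by
          simp [ha, hc0]
        rw [h1, List.take_zero, List.drop_zero]
        constructor
        · intro x hx
          exact absurd hx (by simp)
        · intro x hx
          rcases List.mem_cons.mp hx with rfl | hx
          · omega
          · have := hat x hx; omega

-- the while loop walks exactly the run of v's starting at k
theorem runEnd_eq (s : List Int) (v : Int) (k : Nat)
    (hs : (s.drop k).Pairwise (fun a b => a ≤ b))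
    (hge : ∀ x ∈ s.drop k, v ≤ x) :
    counts34_runEnd s v k = k + (s.drop k).count v := by
  by_cases h : k < s.length
  · have hdrop : s.drop k = s[k] :: s.drop (k + 1) := List.drop_eq_getElem_cons h
    by_cases hv : s[k] = v
    · rw [counts34_runEnd, dif_pos h, if_pos hv]
      rw [runEnd_eq s v (k + 1)
        (by rw [hdrop] at hs; exact (List.pairwise_cons.mp hs).2)
        (by intro x hx; exact hge x (by rw [hdrop]; exact List.mem_cons_of_mem _ hx))]
      rw [hdrop, List.count_cons, hv]
      simp; omega
    · rw [counts34_runEnd, dif_pos h, if_neg hv]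
      have hrest0 : (s.drop k).count v = 0 := by
        apply List.count_eq_zero.mpr
        intro hmem
        rw [hdrop] at hmem hs hge
        rcases List.mem_cons.mp hmem with he | hmem
        · exact hv he.symm
        · have h1 : s[k] ≤ v := (List.pairwise_cons.mp hs).1 v hmem
          have h2 : v ≤ s[k] := hge s[k] (List.mem_cons_self ..)
          exact hv (by omega)
      omega
  · rw [counts34_runEnd, dif_neg h]
    rw [List.drop_eq_nil_of_le (by omega)]
    simp
termination_by s.length - k

-- proof-side description of the loop's control list: v, v+1, v+2, …
def consecFrom (v : Int) : List Int → Bool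
  | [] => true
  | w :: rest => w == v && consecFrom (v + 1) rest

-- the outer loop appends the count of each control value in turn
theorem outer_eq (s : List Int) (hs : s.Pairwise (fun a b => a ≤ b)) :
    ∀ (vs : List Int) (v : Int) (out : List Int), consecFrom v vs = true →
      counts34_outer s vs (s.countP (fun x => decide (x < v))) out
      = out ++ vs.map (fun w => ((s.count w) : Int)) := by
  intro vs
  induction vs with
  | nil => intro v out _; simp [counts34_outer]
  | cons w rest ih =>
      intro v out hc
      simp only [consecFrom, Bool.and_eq_true, beq_iff_eq] at hc
      obtain ⟨rfl, hc⟩ := hc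
      set j := s.countP (fun x => decide (x < w)) with hj
      have hk : counts34_runEnd s w j = j + (s.drop j).count w := by
        apply runEnd_eq
        · exact hs.sublist (List.drop_sublist _ _)
        · exact (sorted_split s hs w).2
      have hdropcount : (s.drop j).count w = s.count w := by
        conv_rhs => rw [← List.take_append_drop j s]
        rw [List.count_append]
        have h0 : (s.take j).count w = 0 := by
          apply List.count_eq_zero.mpr
          intro hmem
          have := (sorted_split s hs w).1 w hmem
          omega
        omega
      simp only [counts34_outer]
      have hknat : counts34_runEnd s w j = s.countP (fun x => decide (x < w + 1)) := by
        rw [hk, hdropcount, countP_lt_succ, hj]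
      have hdiff : ((counts34_runEnd s w j - j : Nat) : Int) = (s.count w : Int) := by
        rw [hk, hdropcount]; omega
      rw [hdiff, hknat, ih (w + 1) (out ++ [(s.count w : Int)]) hc]
      simp

-- pairwise last element is maximal
theorem getLastD_max (s : List Int) (hs : s.Pairwise (fun a b => a ≤ b)) :
    ∀ x ∈ s, x ≤ s.getLastD 0 := by
  induction s with
  | nil => simp
  | cons a t ih =>
      intro x hx
      rcases List.mem_cons.mp hx with rfl | hx
      · cases t with
        | nil => simp
        | cons b u =>
            have hab : x ≤ b := (List.pairwise_cons.mp hs).1 b (List.mem_cons_self ..)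
            have := ih (List.pairwise_cons.mp hs).2 b (List.mem_cons_self ..)
            simpa [List.getLastD_cons] using le_trans hab this
      · cases t with
        | nil => simp at hx
        | cons b u =>
            have := ih (List.pairwise_cons.mp hs).2 x hx
            simpa [List.getLastD_cons] using this

-- ===== VERDICT (by name: the statement is the Claim_ definition above) =====
theorem counts34_py_spec : Claim_equal_counts34_py := by
  intro tiles _
  unfold Spec_counts34_py counts34_py counts34_py_alt
  have hperm : (PySem.List.sorted tiles (fun x => x) false).Perm tiles :=
    PySem.List.sorted_perm ..
  have hpw : (PySem.List.sorted tiles (fun x => x) false).Pairwise (fun a b => a ≤ b) := by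
    have := PySem.List.sorted_pairwise (xs := tiles) (key := fun x => x)
    simpa using this
  set s := PySem.List.sorted tiles (fun x => x) false with hsdef
  by_cases h : ∃ t ∈ tiles, ¬ (0 ≤ t ∧ t < 34)
  · rw [counts34_loop_invalid _ _ h, if_pos]
    rcases h with ⟨t, ht, hbad⟩
    have hts : t ∈ s := hperm.mem_iff.mpr ht
    have hne : s ≠ [] := List.ne_nil_of_mem hts
    refine ⟨hne, ?_⟩
    obtain ⟨m, rest, hcons⟩ := List.exists_cons_of_ne_nil hne
    by_cases hneg : t < 0
    · left
      have hmin : m ≤ t := by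
        have := PySem.List.key_head_sorted_le (xs := tiles) (key := fun x => x) (hsdef ▸ hcons) t ht
        simpa using this
      rw [hcons]
      simp only [List.headD_cons]
      omega
    · right
      have hmax := getLastD_max s hpw t hts
      omega
  · have hvalid : ∀ t ∈ tiles, 0 ≤ t ∧ t < 34 := by
      intro t ht
      by_contra hc
      exact h ⟨t, ht, hc⟩
    have hvalids : ∀ t ∈ s, 0 ≤ t ∧ t < 34 := fun t ht => hvalid t (hperm.mem_iff.mp ht)
    rw [counts34_loop_valid _ _ hvalid (by simp), if_neg]
    · have h0 : s.countP (fun x => decide (x < (0 : Int))) = 0 := by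
        apply List.countP_eq_zero.mpr
        intro x hx
        have := hvalids x hx
        simp only [decide_eq_true_eq]
        omega
      have hcns : consecFrom 0 (PySem.List.pyRange 0 34 1) = true := by decide
      rw [show (0 : Nat) = s.countP (fun x => decide (x < (0 : Int))) from h0.symm,
        outer_eq s hpw _ 0 [] hcns]
      simp only [List.nil_append]
      have hpr : PySem.List.pyRange 0 34 1 = List.map Int.ofNat (List.range 34) := by
        decide
      rw [hpr, List.map_map]
      apply List.map_congr_left
      intro i hi
      have hi34 : i < 34 := List.mem_range.mp hi
      simp only [Function.comp_apply, Int.ofNat_eq_natCast]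
      rw [hperm.count_eq]
      simp only [List.getD_eq_getElem?_getD, List.getElem?_replicate, hi34, if_true,
        Option.getD_some]
      omega
    · push Not
      intro hne
      obtain ⟨m, rest, hcons⟩ := List.exists_cons_of_ne_nil hne
      have hm : m ∈ s := by rw [hcons]; exact List.mem_cons_self ..
      have hml := hvalids m hm
      have hlast : s.getLastD 0 ∈ s := by
        rw [List.getLastD_eq_getLast?, List.getLast?_eq_some_getLast hne]
        simpa using List.getLast_mem hne
      have hll := hvalids _ hlast
      constructor
      · rw [hcons]; simp only [List.headD_cons]; omega
      · omega
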